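-- pv_equiv track=rewrite | github.com/akerimov/HACKER_RANK | BeautifulPairs.py | beautifulPairs
-- ===== SOURCE A (Python) =====
-- def beautifulPairs(A, B):
--     # initialize the beautiful pairs count
--     beautiful_pairs= 0
--     # loop over each element in A
--     for num_A in A:
--         # check if current element exist in B
--         if num_A in B:
--             # remove the current element from B
--             B.remove(num_A)
--             # update the beautiful pairs counts
--             beautiful_pairs += 1
--
--     # check if beautiful pairs counts is equal to length of A
--     if beautiful_pairs == len(A):
--         # substract exactly 1 pair and return
--         return beautiful_pairs -1
--     # if beautiful pairs counts is less than len(A) add exactly 1 pair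
--     return beautiful_pairs + 1
-- ===== SOURCE B (Python) =====
-- def beautifulPairs(A, B):
--     # Histogram formulation: matched pairs = sum over distinct values of
--     # min(count in A, count in B). (Unlike A, this does not mutate B.)
--     matches = sum(min(A.count(x), B.count(x)) for x in set(A))
--     return matches - 1 if matches == len(A) else matches + 1
-- ===== Notes on version B (the rewrite author's own statement) =====
-- stated objective: alternative
-- what changed: Replaces A's destructive loop (membership test plus B.remove per element of A) by a closed multiset formula: sum over the distinct values of A of min(A.count(x), B.count(x)); B is not mutated.
import Mathlib
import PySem

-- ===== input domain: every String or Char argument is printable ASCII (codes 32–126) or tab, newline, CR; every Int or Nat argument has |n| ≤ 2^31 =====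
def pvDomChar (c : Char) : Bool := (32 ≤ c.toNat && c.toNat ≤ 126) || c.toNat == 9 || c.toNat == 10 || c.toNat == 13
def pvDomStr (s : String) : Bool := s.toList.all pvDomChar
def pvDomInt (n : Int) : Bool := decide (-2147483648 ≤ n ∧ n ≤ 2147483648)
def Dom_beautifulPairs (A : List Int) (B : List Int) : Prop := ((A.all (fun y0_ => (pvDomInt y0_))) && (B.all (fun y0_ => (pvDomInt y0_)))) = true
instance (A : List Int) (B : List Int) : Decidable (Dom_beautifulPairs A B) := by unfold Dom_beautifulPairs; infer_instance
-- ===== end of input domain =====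

-- B replaces A's destructive membership-and-remove loop by the multiset formula
-- sum over set(A) of min(A.count x, B.count x); return value only — A mutates B, B does not.


-- ===== PORT A =====
-- loop state = (current B, beautiful_pairs); 'num_A in B' → contains, 'B.remove' → remove?
def beautifulPairs (A : List Int) (B : List Int) : Int :=
  let st := A.foldl (fun (s : List Int × Int) num_A =>
    if s.1.contains num_A then
      ((PySem.List.remove? s.1 num_A).getD s.1, s.2 + 1)
    else s) (B, 0)
  if st.2 = (A.length : Int) then st.2 - 1 else st.2 + 1

-- ===== PORT B =====
def beautifulPairs_alt (A : List Int) (B : List Int) : Int :=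
  let nmatches : Int :=
    ((PySem.Set.ofList A).map (fun x =>
      min ((PySem.List.count A x : Nat) : Int) ((PySem.List.count B x : Nat) : Int))).sum
  if nmatches = (A.length : Int) then nmatches - 1 else nmatches + 1

-- ===== PRECONDITION & SPEC =====
def Spec_beautifulPairs (A : List Int) (B : List Int) (out : Int) : Prop := out = beautifulPairs_alt A B
instance (A : List Int) (B : List Int) (out : Int) : Decidable (Spec_beautifulPairs A B out) := by unfold Spec_beautifulPairs; infer_instance

-- ===== CLAIM (what is proved, stated in full; the proofs are below) =====
def Claim_equal_beautifulPairs : Prop := ∀ (A : List Int) (B : List Int), Dom_beautifulPairs A B → Spec_beautifulPairs A B (beautifulPairs A B)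

-- ===== LEMMAS AND PROOFS =====

-- A's loop counts the cardinality of the multiset intersection of A and B.
theorem bp_loop_eq (A : List Int) : ∀ (B : List Int) (c : Int),
    (A.foldl (fun (s : List Int × Int) num_A =>
      if s.1.contains num_A then
        ((PySem.List.remove? s.1 num_A).getD s.1, s.2 + 1)
      else s) (B, c)).2 = c + (((A : Multiset Int) ∩ (B : Multiset Int)).card : Int) := by
  induction A with
  | nil => intro B c; simp
  | cons a A ih =>
    intro B c
    rw [List.foldl_cons]
    by_cases hmem : a ∈ B
    · have hc : B.contains a = true := List.contains_iff_mem.mpr hmem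
      show (List.foldl _ (if B.contains a then ((PySem.List.remove? B a).getD B, c + 1) else (B, c)) A).2 = _
      rw [hc, if_pos rfl, PySem.List.remove?_eq_some_erase B a hmem, Option.getD_some, ih]
      rw [show ((a :: A : List Int) : Multiset Int) = a ::ₘ (A : Multiset Int) from rfl,
        Multiset.cons_inter_of_pos _ hmem]
      simp only [Multiset.coe_erase, Multiset.card_cons]
      push_cast
      ring
    · have hc : B.contains a = false := by simpa using hmem
      show (List.foldl _ (if B.contains a then ((PySem.List.remove? B a).getD B, c + 1) else (B, c)) A).2 = _
      rw [hc, if_neg (by simp), ih]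
      rw [show ((a :: A : List Int) : Multiset Int) = a ::ₘ (A : Multiset Int) from rfl,
        Multiset.cons_inter_of_neg _ hmem]

-- B's sum of minima over the distinct values of A is the same cardinality.
theorem bp_sum_eq (A B : List Int) :
    ((PySem.Set.ofList A).map (fun x =>
      min ((PySem.List.count A x : Nat) : Int) ((PySem.List.count B x : Nat) : Int))).sum
    = (((A : Multiset Int) ∩ (B : Multiset Int)).card : Int) := by
  have hnat : ((PySem.Set.ofList A).map (fun x =>
      min (PySem.List.count A x) (PySem.List.count B x))).sum
      = ((A : Multiset Int) ∩ (B : Multiset Int)).card := by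
    rw [← List.sum_toFinset _ (PySem.Set.nodup_ofList A)]
    have hfs : (PySem.Set.ofList A).toFinset = A.toFinset := by
      ext x; simp [PySem.Set.mem_ofList]
    have hsub : ((A : Multiset Int) ∩ (B : Multiset Int)).toFinset ⊆ A.toFinset := by
      intro x hx
      simp only [Multiset.mem_toFinset, Multiset.mem_inter] at hx
      simpa [List.mem_toFinset] using hx.1
    have hzero : ∀ x ∈ A.toFinset, x ∉ ((A : Multiset Int) ∩ (B : Multiset Int)).toFinset →
        Multiset.count x ((A : Multiset Int) ∩ (B : Multiset Int)) = 0 := by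
      intro x _ hnx
      exact Multiset.count_eq_zero.mpr (by simpa [Multiset.mem_toFinset] using hnx)
    calc (PySem.Set.ofList A).toFinset.sum (fun x =>
          min (PySem.List.count A x) (PySem.List.count B x))
        = A.toFinset.sum (fun x => min (PySem.List.count A x) (PySem.List.count B x)) := by
          rw [hfs]
      _ = ∑ x ∈ A.toFinset, Multiset.count x ((A : Multiset Int) ∩ (B : Multiset Int)) := by
          apply Finset.sum_congr rfl
          intro x _
          rw [Multiset.count_inter]
          simp [PySem.List.count_eq, Multiset.coe_count]
      _ = ∑ x ∈ ((A : Multiset Int) ∩ (B : Multiset Int)).toFinset,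
            Multiset.count x ((A : Multiset Int) ∩ (B : Multiset Int)) :=
          (Finset.sum_subset hsub hzero).symm
      _ = _ := Multiset.toFinset_sum_count_eq _
  rw [← hnat, Nat.cast_list_sum, List.map_map]
  congr 1
  apply List.map_congr_left
  intro x _
  simp [Nat.cast_min]

-- ===== VERDICT (by name: the statement is the Claim_ definition above) =====
theorem beautifulPairs_spec : Claim_equal_beautifulPairs := by
  intro A B _
  unfold Spec_beautifulPairs beautifulPairs beautifulPairs_alt
  simp only
  rw [bp_loop_eq, bp_sum_eq, zero_add]
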